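-- pv_equiv track=rewrite | github.com/gaestu/SurfSifter | src/extractors/browser/safari/_patterns.py | _with_absolute_variants
-- ===== SOURCE A (Python) =====
-- from typing import Dict, List, Optional, Literal, TypedDict
--
-- def _with_absolute_variants(paths: List[str]) -> List[str]:
--     """
--     Expand root patterns to include both relative and absolute forms.
--
--     file_list rows from SleuthKit are typically absolute ("/Users/..."),
--     while some scanners may use relative roots.
--     """
--     expanded: List[str] = []
--     seen: set[str] = set()
--
--     for path in paths:
--         for candidate in (path, f"/{path}" if not path.startswith("/") else path):
--             if candidate not in seen:
--                 seen.add(candidate)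
--                 expanded.append(candidate)
--
--     return expanded
-- ===== SOURCE B (Python) =====
-- from typing import List
--
--
-- def _with_absolute_variants(paths: List[str]) -> List[str]:
--     """Index-based: flatten candidates, record each value's minimal index by a
--     reverse overwrite pass (no membership tests), then gather by sorted index."""
--     candidates: List[str] = []
--     for path in paths:
--         candidates.append(path)
--         if not path.startswith("/"):
--             candidates.append("/" + path)
--     first = {}
--     for i in range(len(candidates) - 1, -1, -1):
--         first[candidates[i]] = i
--     return [candidates[i] for i in sorted(first.values())]
-- ===== Notes on version B (the rewrite author's own statement) =====
-- stated objective: alternative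
-- what changed: B replaces A's single interleaved seen-set loop by an index-based pipeline with no membership test at all: flatten all candidates, compute each distinct value's minimal index with one reverse overwrite pass over a dict, then emit candidates at the sorted first-occurrence indices.
import Mathlib
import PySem

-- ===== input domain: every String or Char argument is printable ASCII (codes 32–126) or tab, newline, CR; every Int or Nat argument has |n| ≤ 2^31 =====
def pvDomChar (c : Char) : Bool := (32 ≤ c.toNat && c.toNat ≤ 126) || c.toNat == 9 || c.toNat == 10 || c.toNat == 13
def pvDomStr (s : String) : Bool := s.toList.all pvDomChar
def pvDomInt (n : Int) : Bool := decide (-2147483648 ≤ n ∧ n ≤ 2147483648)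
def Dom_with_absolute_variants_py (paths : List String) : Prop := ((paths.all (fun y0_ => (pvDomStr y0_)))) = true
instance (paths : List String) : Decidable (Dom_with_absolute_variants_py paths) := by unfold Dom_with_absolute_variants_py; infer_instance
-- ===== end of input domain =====

-- B replaces A's interleaved seen-set loop by an index pipeline (flatten, reverse overwrite
-- of minimal indices, gather at sorted indices); same return value (objective: alternative).

-- ===== PORT A =====
-- A's inner 'for candidate in (path, f"/{path}" if … else path)' tuple's second component
def pvVariantA (p : String) : String :=
  if PySem.Str.startswith p "/" then p else "/" ++ p

-- body of A's inner loop: state (expanded, seen)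
def pvStepA (st : List String × PySem.Set String) (c : String) :
    List String × PySem.Set String :=
  if st.2.contains c then st else (st.1 ++ [c], st.2.add c)

def with_absolute_variants_py (paths : List String) : List String :=
  (paths.foldl (fun st p => ([p, pvVariantA p].foldl pvStepA st))
    (([] : List String), (PySem.Set.empty : PySem.Set String))).1

-- ===== PORT B =====
def with_absolute_variants_py_alt (paths : List String) : List String :=
  let candidates := paths.foldl (fun acc p =>
      let acc2 := acc ++ [p]
      if PySem.Str.startswith p "/" then acc2 else acc2 ++ ["/" ++ p]) ([] : List String)
  let first := (PySem.List.pyRange ((candidates.length : Int) - 1) (-1) (-1)).foldl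
      (fun d i => d.insert (PySem.List.pyGetD candidates i "") i)
      (PySem.Dict.empty : PySem.Dict String Int)
  (PySem.List.sorted first.values (fun x => x) false).map
    (fun i => PySem.List.pyGetD candidates i "")

-- ===== PRECONDITION & SPEC =====
def Spec_with_absolute_variants_py (paths : List String) (out : List String) : Prop := out = with_absolute_variants_py_alt paths
instance (paths : List String) (out : List String) : Decidable (Spec_with_absolute_variants_py paths out) := by unfold Spec_with_absolute_variants_py; infer_instance

-- ===== CLAIM (what is proved, stated in full; the proofs are below) =====
def Claim_equal_with_absolute_variants_py : Prop := ∀ (paths : List String), Dom_with_absolute_variants_py paths → Spec_with_absolute_variants_py paths (with_absolute_variants_py paths)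

-- ===== LEMMAS AND PROOFS =====

-- the candidate block one path contributes (with the absolute duplicate collapsed)
def pvCand (p : String) : List String :=
  if PySem.Str.startswith p "/" then [p] else [p, "/" ++ p]

-- B's first loop builds exactly the flat candidate list
lemma pvCandList (paths : List String) (acc : List String) :
    paths.foldl (fun acc p =>
      let acc2 := acc ++ [p]
      if PySem.Str.startswith p "/" then acc2 else acc2 ++ ["/" ++ p]) acc
      = acc ++ paths.flatMap pvCand := by
  induction paths generalizing acc with
  | nil => simp
  | cons p ps ih =>
    simp only [List.foldl_cons, List.flatMap_cons, ih, pvCand]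
    split <;> simp

-- A's loop with expanded = seen folds Set.add over the candidate blocks
lemma pvFoldA (paths : List String) (e : List String) :
    paths.foldl (fun st p => ([p, pvVariantA p].foldl pvStepA st)) (e, e)
      = (let E := (paths.flatMap pvCand).foldl PySem.Set.add e
         (E, E)) := by
  induction paths generalizing e with
  | nil => simp
  | cons p ps ih =>
    have hstep : ∀ (s : List String) (c : String),
        pvStepA (s, s) c = (PySem.Set.add s c, PySem.Set.add s c) := by
      intro s c
      simp only [pvStepA, PySem.Set.add]
      split <;> simp_all
    have hadd : ∀ (s : List String) (c : String),
        PySem.Set.add (PySem.Set.add s c) c = PySem.Set.add s c := by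
      intro s c
      simp [PySem.Set.add]
      split <;> simp_all
    simp only [List.foldl_cons, List.flatMap_cons, List.foldl_append, hstep,
      pvVariantA, pvCand]
    split
    · simpa [hadd] using ih (PySem.Set.add e p)
    · exact ih _
  
-- the dict B's reverse loop produces, described structurally (head inserted last)
def pvDfor : List String → Int → PySem.Dict String Int
  | [], _ => PySem.Dict.empty
  | x :: xs, j => (pvDfor xs (j + 1)).insert x j

lemma pvDforGet (xs : List String) (j : Int) (y : String) :
    (pvDfor xs j).get? y
      = if y ∈ xs then some (j + (xs.idxOf y : Int)) else none := by
  induction xs generalizing j with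
  | nil => simp [pvDfor]
  | cons x xs ih =>
    simp only [pvDfor, PySem.Dict.get?_insert, ih]
    by_cases hxy : y = x
    · simp [hxy]
    · simp [hxy, List.idxOf_cons_ne _ (by exact fun h => hxy h.symm)]
      split <;> [push_cast; skip] <;> simp
      omega

lemma pvDforKeysNodup (xs : List String) (j : Int) : (pvDfor xs j).keys.Nodup := by
  induction xs generalizing j with
  | nil => simp [pvDfor, PySem.Dict.keys_empty]
  | cons x xs ih =>
    by_cases hc : (pvDfor xs (j + 1)).contains x
    · simpa [pvDfor, PySem.Dict.keys_insert_of_contains _ _ hc] using ih (j + 1)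
    · have := ih (j + 1)
      have hx : x ∉ (pvDfor xs (j + 1)).keys := by
        rw [← PySem.Dict.contains_iff_mem_keys]
        simp [hc]
      simp only [pvDfor, PySem.Dict.keys_insert_of_not_contains _ _ (by simpa using hc)]
      simp [List.nodup_append, this]
      intro a ha h
      exact hx (h ▸ ha)

lemma pvDforKeysMem (xs : List String) (j : Int) (y : String) :
    y ∈ (pvDfor xs j).keys ↔ y ∈ xs := by
  induction xs generalizing j with
  | nil => simp [pvDfor, PySem.Dict.keys_empty]
  | cons x xs ih => simp [pvDfor, PySem.Dict.mem_keys_insert, ih]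

-- B's reverse index loop computes pvDfor
lemma pvRevLoop (L : List String) :
    (PySem.List.pyRange ((L.length : Int) - 1) (-1) (-1)).foldl
      (fun d i => d.insert (PySem.List.pyGetD L i "") i)
      (PySem.Dict.empty : PySem.Dict String Int) = pvDfor L 0 := by
  have key : ∀ (m k : Nat), k + m = L.length →
      (PySem.List.pyRange (k : Int) (L.length : Int) 1).foldr
        (fun i d => d.insert (PySem.List.pyGetD L i "") i)
        (PySem.Dict.empty : PySem.Dict String Int) = pvDfor (L.drop k) (k : Int) := by
    intro m
    induction m with
    | zero =>
      intro k hk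
      rw [PySem.List.pyRange_one_eq_nil (by omega)]
      have hd : L.drop k = [] := List.drop_of_length_le (by omega)
      simp [hd, pvDfor]
    | succ m ih =>
      intro k hk
      rw [PySem.List.pyRange_one_cons (by exact_mod_cast (by omega : k < L.length))]
      have hklt : k < L.length := by omega
      have hdrop : L.drop k = L[k] :: L.drop (k + 1) :=
        List.drop_eq_getElem_cons hklt
      have hget : PySem.List.pyGetD L (k : Int) "" = L[k] := by
        rw [PySem.List.pyGetD_natCast]
        exact List.getD_eq_getElem _ _ hklt
      have := ih (k + 1) (by omega)
      simp only [List.foldr_cons, hget, hdrop, pvDfor]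
      rw [show ((k : Int) + 1) = ((k + 1 : Nat) : Int) by push_cast; ring]
      rw [this]
  have h0 := key L.length 0 (by omega)
  rw [PySem.List.pyRange_neg_one_eq_reverse, List.foldl_reverse]
  simpa using h0

-- dedup grows on the right one first occurrence at a time
lemma pvDedupConcat (L : List String) (x : String) :
    PySem.List.dedup (L ++ [x])
      = PySem.List.dedup L ++ (if x ∈ L then [] else [x]) := by
  simp only [PySem.List.dedup_eq_ofList, PySem.Set.ofList_eq_foldl, List.foldl_append,
    List.foldl_cons, List.foldl_nil]
  have hmem : (PySem.Set.contains (PySem.Set.ofList L) x) = decide (x ∈ L) := by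
    simp only [PySem.Set.contains]
    by_cases h : x ∈ L
    · simp [h, (PySem.Set.mem_ofList L x).mpr h]
    · simp only [h, decide_false]
      rw [← Bool.not_eq_true, List.contains_iff_mem]
      simp [PySem.Set.mem_ofList, h]
  rw [PySem.Set.ofList_eq_foldl] at hmem
  simp only [PySem.Set.add, hmem]
  split <;> simp_all

-- the first-occurrence indices of dedup L are strictly increasing
lemma pvPairwiseIdx (L : List String) :
    ((PySem.List.dedup L).map (fun a => (L.idxOf a : Int))).Pairwise (· < ·) := by
  induction L using List.reverseRecOn with
  | nil => simp [PySem.List.dedup]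
  | append_singleton L x ih =>
    rw [pvDedupConcat]
    by_cases hx : x ∈ L
    · simp only [hx, if_true, List.append_nil]
      have : ∀ a ∈ PySem.List.dedup L, ((L ++ [x]).idxOf a : Int) = (L.idxOf a : Int) := by
        intro a ha
        rw [List.idxOf_append_of_mem ((PySem.List.mem_dedup _ _).mp ha)]
      rw [List.map_congr_left this]
      exact ih
    · simp only [hx, if_false, List.map_append, List.map_cons, List.map_nil]
      rw [List.pairwise_append]
      refine ⟨?_, by simp, ?_⟩
      · have : ∀ a ∈ PySem.List.dedup L, ((L ++ [x]).idxOf a : Int) = (L.idxOf a : Int) := by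
          intro a ha
          rw [List.idxOf_append_of_mem ((PySem.List.mem_dedup _ _).mp ha)]
        rw [List.map_congr_left this]
        exact ih
      · intro u hu v hv
        simp only [List.mem_cons, List.not_mem_nil, or_false] at hv
        subst hv
        obtain ⟨a, ha, rfl⟩ := List.mem_map.mp hu
        have haL : a ∈ L := (PySem.List.mem_dedup _ _).mp ha
        rw [List.idxOf_append_of_mem haL]
        rw [show (L ++ [x]).idxOf x = L.length from by
          rw [List.idxOf_append_of_notMem hx]; simp]
        exact_mod_cast List.idxOf_lt_length_of_mem haL

-- main B characterisation: B returns dedup of its candidate list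
lemma pvAltEq (paths : List String) :
    with_absolute_variants_py_alt paths
      = PySem.List.dedup (paths.flatMap pvCand) := by
  unfold with_absolute_variants_py_alt
  rw [pvCandList]
  simp only [List.nil_append]
  set L := paths.flatMap pvCand with hL
  rw [pvRevLoop]
  -- values of the dict are the first-occurrence indices of the (unordered) distinct values
  have hnodup := pvDforKeysNodup L 0
  have hvals : (pvDfor L 0).values
      = (pvDfor L 0).keys.map (fun k => (pvDfor L 0).getD k 0) :=
    PySem.Dict.values_eq_map_keys _ hnodup 0
  have hgetD : ∀ k ∈ (pvDfor L 0).keys, (pvDfor L 0).getD k 0 = (L.idxOf k : Int) := by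
    intro k hk
    have hkL : k ∈ L := (pvDforKeysMem L 0 k).mp hk
    rw [PySem.Dict.getD_eq_get?_getD, pvDforGet]
    simp [hkL]
  -- the sorted values are exactly the increasing first-occurrence index list of dedup L
  have hperm : ((PySem.List.dedup L).map (fun a => (L.idxOf a : Int))).Perm
      (pvDfor L 0).values := by
    rw [hvals, List.map_congr_left hgetD]
    refine List.Perm.map _ ?_
    rw [List.perm_ext_iff_of_nodup (PySem.List.nodup_dedup L) hnodup]
    intro a
    rw [PySem.List.mem_dedup, pvDforKeysMem]
  have hpw : ((PySem.List.dedup L).map (fun a => (L.idxOf a : Int))).Pairwise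
      (fun a b => (fun x : Int => x) a < (fun x : Int => x) b) := by
    simpa using pvPairwiseIdx L
  have hs := PySem.List.sorted_eq_of_perm_of_pairwise_lt _ _ _ hperm hpw
  rw [hs]
  rw [List.map_map]
  refine List.map_congr_left ?_ |>.trans (List.map_id _)
  intro a ha
  have haL : a ∈ L := (PySem.List.mem_dedup _ _).mp ha
  simp only [Function.comp_apply, PySem.List.pyGetD_natCast, id]
  rw [List.getD_eq_getElem _ _ (List.idxOf_lt_length_of_mem haL)]
  exact List.getElem_idxOf (List.idxOf_lt_length_of_mem haL)

-- ===== VERDICT (by name: the statement is the Claim_ definition above) =====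
theorem with_absolute_variants_py_spec : Claim_equal_with_absolute_variants_py := by
  intro paths _
  unfold Spec_with_absolute_variants_py with_absolute_variants_py
  rw [show (([] : List String), (PySem.Set.empty : PySem.Set String))
      = (([] : List String), ([] : List String)) from rfl, pvFoldA]
  rw [pvAltEq]
  simp [PySem.List.dedup_eq_ofList, PySem.Set.ofList_eq_foldl]
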